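-- pv_equiv track=rewrite | github.com/dbcli/pgcli | prompt_toolkit/styles/utils.py | split_token_in_parts
-- ===== SOURCE A (Python) =====
-- def split_token_in_parts(token):
--     """
--     Take a Token, and turn it in a list of tokens, by splitting
--     it on ':' (taking that as a separator.)
--
--     (This returns a `tuple` of tuples, usable for hashing.)
--     """
--     result = []
--     current = []
--     for part in token + (':', ):
--         if part == ':':
--             if current:
--                 result.append(tuple(current))
--                 current = []
--         else:
--             current.append(part)
--
--     # Remove empty items, duplicates and return sorted as a tuple.
--     return tuple(sorted(set(filter(None, result))))
-- ===== SOURCE B (Python) =====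
-- def split_token_in_parts(token):
--     seq = list(token)
--     cuts = [-1] + [i for i, p in enumerate(seq) if p == ':'] + [len(seq)]
--     parts = {tuple(seq[a + 1:b]) for a, b in zip(cuts, cuts[1:]) if b - a > 1}
--     return tuple(sorted(parts))
-- ===== Notes on version B (the rewrite author's own statement) =====
-- stated objective: alternative
-- what changed: Replaces A's single-pass run accumulator (current/result with an appended ':' sentinel and filter(None)) by a staged index algorithm: first compute the list of ':' positions, then slice the sequence between consecutive cut positions via zip(cuts, cuts[1:]), keeping only non-empty slices.
import Mathlib
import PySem

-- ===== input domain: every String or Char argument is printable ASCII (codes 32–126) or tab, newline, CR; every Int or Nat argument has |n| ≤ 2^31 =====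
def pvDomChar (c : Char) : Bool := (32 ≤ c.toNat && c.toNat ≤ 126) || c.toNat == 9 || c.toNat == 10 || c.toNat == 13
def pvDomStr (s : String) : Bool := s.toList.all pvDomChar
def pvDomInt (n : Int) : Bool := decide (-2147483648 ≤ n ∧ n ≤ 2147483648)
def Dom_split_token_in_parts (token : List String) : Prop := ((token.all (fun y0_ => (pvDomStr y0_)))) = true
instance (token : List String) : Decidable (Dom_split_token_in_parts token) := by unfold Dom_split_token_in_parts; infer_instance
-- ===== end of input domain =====

-- B replaces A's single-pass result/current accumulator (with its ':' sentinel and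
-- filter(None) pass) by a staged index algorithm: compute the ':' cut positions first,
-- then slice between consecutive cuts; alternative decomposition, same cost.


-- ===== PORT A =====
-- one loop step: 'if part == ':': if current: result.append(tuple(current)); current=[] else: current.append(part)'
def pvStepA (st : List (List String) × List String) (part : String) :
    List (List String) × List String :=
  if part = ":" then (if st.2 ≠ [] then (st.1 ++ [st.2], []) else st)
  else (st.1, st.2 ++ [part])

def split_token_in_parts (token : List String) : List (List String) :=
  -- tuple(sorted(set(filter(None, result))))
  PySem.List.sorted
    (PySem.Set.ofList
      ((((token ++ [":"]).foldl pvStepA ([], [])).1).filter (fun p => !p.isEmpty)))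
    (fun x => x) false

-- ===== PORT B =====
def split_token_in_parts_alt (token : List String) : List (List String) :=
  -- seq = list(token)
  let seq := token
  -- cuts = [-1] + [i for i, p in enumerate(seq) if p == ':'] + [len(seq)]
  let cuts : List Int :=
    [-1] ++ ((PySem.List.enumerate seq).filterMap
               (fun ip => if ip.2 = ":" then some ip.1 else none)) ++ [(seq.length : Int)]
  -- parts = {tuple(seq[a+1:b]) for a, b in zip(cuts, cuts[1:]) if b - a > 1}
  let parts := PySem.Set.ofList
    ((cuts.zip cuts.tail).filterMap
      (fun ab => if ab.2 - ab.1 > 1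
                 then some (PySem.List.slice seq (some (ab.1 + 1)) (some ab.2))
                 else none))
  -- return tuple(sorted(parts))
  PySem.List.sorted parts (fun x => x) false

-- ===== PRECONDITION & SPEC =====
def Spec_split_token_in_parts (token : List String) (out : List (List String)) : Prop := out = split_token_in_parts_alt token
instance (token : List String) (out : List (List String)) : Decidable (Spec_split_token_in_parts token out) := by unfold Spec_split_token_in_parts; infer_instance

-- ===== CLAIM (what is proved, stated in full; the proofs are below) =====
def Claim_equal_split_token_in_parts : Prop := ∀ (token : List String), Dom_split_token_in_parts token → Spec_split_token_in_parts token (split_token_in_parts token)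

-- ===== LEMMAS AND PROOFS =====

-- the maximal non-':' runs, a common reference point for both ports
def pvRuns : List String → List (List String)
  | [] => []
  | x :: xs =>
    if x = ":" then pvRuns xs
    else (x :: xs.takeWhile (fun y => !(y = ":" : Bool))) ::
         pvRuns (xs.dropWhile (fun y => !(y = ":" : Bool)))
termination_by l => l.length
decreasing_by
  · simp
  · have := List.length_dropWhile_le (fun y => !(y = ":" : Bool)) xs
    simp only [List.length_cons]
    omega

---- A side ----

-- the pending-run collector A's loop computes
def pvG : List String → List String → List (List String)
  | [], cur => if cur = [] then [] else [cur]
  | x :: xs, cur =>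
    if x = ":" then (if cur = [] then pvG xs [] else cur :: pvG xs [])
    else pvG xs (cur ++ [x])

lemma foldl_stepA_eq_pvG (l : List String) (res : List (List String)) (cur : List String) :
    ((l ++ [":"]).foldl pvStepA (res, cur)).1 = res ++ pvG l cur := by
  induction l generalizing res cur with
  | nil =>
    by_cases h : cur = [] <;> simp [pvStepA, pvG, h]
  | cons x xs ih =>
    rw [List.cons_append, List.foldl_cons]
    by_cases hx : x = ":"
    · by_cases hc : cur = []
      · rw [show pvStepA (res, cur) x = (res, cur) from by simp [pvStepA, hx, hc], ih]
        simp [pvG, hx, hc]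
      · rw [show pvStepA (res, cur) x = (res ++ [cur], []) from by simp [pvStepA, hx, hc], ih]
        simp [pvG, hx, hc]
    · rw [show pvStepA (res, cur) x = (res, cur ++ [x]) from by simp [pvStepA, hx], ih]
      simp [pvG, hx]

lemma pvG_eq_runs (l : List String) :
    pvG l [] = pvRuns l ∧
    ∀ cur : List String, cur ≠ [] →
      pvG l cur = (cur ++ l.takeWhile (fun y => !(y = ":" : Bool))) ::
                  pvRuns (l.dropWhile (fun y => !(y = ":" : Bool))) := by
  induction l with
  | nil => exact ⟨by simp [pvG, pvRuns], fun cur hc => by simp [pvG, pvRuns, hc]⟩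
  | cons x xs ih =>
    constructor
    · by_cases hx : x = ":"
      · simp [pvG, pvRuns, hx, ih.1]
      · rw [pvG, pvRuns]
        simp only [hx, if_false]
        rw [show ([] : List String) ++ [x] = [x] from rfl] at *
        rw [ih.2 [x] (by simp)]
        simp
    · intro cur hc
      by_cases hx : x = ":"
      · simp [pvG, pvRuns, hx, hc, ih.1]
      · rw [pvG]
        simp only [hx, if_false]
        rw [ih.2 (cur ++ [x]) (by simp)]
        simp [List.takeWhile_cons, List.dropWhile_cons, hx]

lemma pvRuns_nonempty (l : List String) : ∀ p ∈ pvRuns l, p ≠ [] := by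
  induction l using pvRuns.induct with
  | case1 => simp [pvRuns]
  | case2 xs ih => rw [pvRuns]; simpa using ih
  | case3 x xs hx ih =>
    rw [pvRuns]; simp only [hx, if_false]
    intro p hp
    rcases List.mem_cons.mp hp with h | h
    · simp [h]
    · exact ih p h

---- B side ----

-- the colon positions of l, starting the count at s
def pvColPos (l : List String) (s : Int) : List Int :=
  (PySem.List.enumerate l s).filterMap (fun ip => if ip.2 = ":" then some ip.1 else none)

-- the slices between consecutive cut positions of c
def pvSlices (l : List String) (c : List Int) : List (List String) :=
  (c.zip c.tail).filterMap
    (fun ab => if ab.2 - ab.1 > 1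
               then some (PySem.List.slice l (some (ab.1 + 1)) (some ab.2))
               else none)

def pvCuts (l : List String) : List Int := -1 :: (pvColPos l 0 ++ [(l.length : Int)])

lemma pvColPos_nil (s : Int) : pvColPos [] s = [] := by
  simp [pvColPos, PySem.List.enumerate_nil]

lemma pvColPos_cons (x : String) (l : List String) (s : Int) :
    pvColPos (x :: l) s = (if x = ":" then [s] else []) ++ pvColPos l (s + 1) := by
  by_cases hx : x = ":" <;> simp [pvColPos, PySem.List.enumerate_cons, hx]

lemma pvColPos_shift (l : List String) (s t : Int) :
    pvColPos l (s + t) = (pvColPos l s).map (· + t) := by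
  induction l generalizing s with
  | nil => simp [pvColPos_nil]
  | cons x xs ih =>
    rw [pvColPos_cons, pvColPos_cons, show s + t + 1 = (s + 1) + t by ring, ih]
    by_cases hx : x = ":" <;> simp [hx]

lemma pvColPos_no_colon (l : List String) (h : ∀ y ∈ l, y ≠ ":") (s : Int) :
    pvColPos l s = [] := by
  induction l generalizing s with
  | nil => exact pvColPos_nil s
  | cons x xs ih =>
    rw [pvColPos_cons]
    have hx : x ≠ ":" := h x (by simp)
    simp [hx, ih (fun y hy => h y (by simp [hy]))]

lemma pvColPos_ge (l : List String) (s : Int) : ∀ a ∈ pvColPos l s, s ≤ a := by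
  induction l generalizing s with
  | nil => simp [pvColPos_nil]
  | cons x xs ih =>
    intro a ha
    rw [pvColPos_cons] at ha
    rcases List.mem_append.mp ha with h | h
    · by_cases hx : x = ":" <;> simp [hx] at h; omega
    · have := ih (s + 1) a h; omega

lemma pvCuts_ge (l : List String) : ∀ a ∈ pvCuts l, -1 ≤ a := by
  intro a ha
  rcases List.mem_cons.mp ha with h | h
  · omega
  · rcases List.mem_append.mp h with h | h
    · have := pvColPos_ge l 0 a h; omega
    · simp at h; omega

lemma pvSlices_shift (pre rest : List String) (c : List Int) (h : ∀ a ∈ c, -1 ≤ a) :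
    pvSlices (pre ++ rest) (c.map (· + (pre.length : Int))) = pvSlices rest c := by
  unfold pvSlices
  rw [← List.map_tail, List.zip_map, List.filterMap_map]
  apply List.filterMap_congr
  intro ab hab
  have ha : -1 ≤ ab.1 := h _ (List.of_mem_zip hab).1
  have hb : -1 ≤ ab.2 := h _ (List.mem_of_mem_tail (List.of_mem_zip hab).2)
  simp only [Prod.map, Function.comp]
  have hcond : (ab.2 + (pre.length : Int)) - (ab.1 + (pre.length : Int)) = ab.2 - ab.1 := by ring
  rw [hcond]
  by_cases hgt : ab.2 - ab.1 > 1
  · simp only [hgt, if_pos]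
    congr 1
    have hL := PySem.List.slice_toNat (pre ++ rest)
      (a := ab.1 + (pre.length : Int) + 1) (b := ab.2 + (pre.length : Int)) (by omega) (by omega)
    have hR := PySem.List.slice_toNat rest (a := ab.1 + 1) (b := ab.2) (by omega) (by omega)
    rw [hL, hR]
    have e1 : (ab.1 + (pre.length : Int) + 1).toNat = pre.length + (ab.1 + 1).toNat := by omega
    have e2 : (ab.2 + (pre.length : Int)).toNat = pre.length + ab.2.toNat := by omega
    rw [e1, e2, List.drop_append]
    rw [List.drop_eq_nil_of_le (by omega), List.nil_append]
    congr 1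
    · omega
    · congr 1
      omega
  · simp [hgt]

lemma pvSlices_cons (l : List String) (a b : Int) (c : List Int) :
    pvSlices l (a :: b :: c)
      = (if b - a > 1 then [PySem.List.slice l (some (a + 1)) (some b)] else [])
        ++ pvSlices l (b :: c) := by
  unfold pvSlices
  rw [List.tail_cons, List.zip_cons_cons, List.filterMap_cons]
  by_cases h : b - a > 1 <;> simp [h]

lemma pvSlices_single (l : List String) (a : Int) : pvSlices l [a] = [] := by
  simp [pvSlices]

lemma pvSlices_cons_colon (l : List String) :
    pvSlices (":" :: l) (pvCuts (":" :: l)) = pvSlices l (pvCuts l) := by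
  have hcuts : pvCuts (":" :: l) = -1 :: 0 :: ((pvColPos l 0 ++ [(l.length : Int)]).map (· + 1)) := by
    unfold pvCuts
    rw [pvColPos_cons, show (0:Int) + 1 = 0 + 1 by ring, pvColPos_shift]
    simp
  rw [hcuts, pvSlices_cons]
  rw [if_neg (by omega), List.nil_append]
  have hmap : (0 : Int) :: ((pvColPos l 0 ++ [(l.length : Int)]).map (· + 1))
      = (pvCuts l).map (· + 1) := by
    unfold pvCuts; simp
  rw [hmap]
  have := pvSlices_shift [":"] l (pvCuts l) (pvCuts_ge l)
  simpa using this

lemma pvSlices_eq_runs (l : List String) : pvSlices l (pvCuts l) = pvRuns l := by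
  induction l using pvRuns.induct with
  | case1 =>
    simp [pvRuns, pvSlices, pvCuts, pvColPos_nil]
  | case2 xs ih =>
    rw [pvSlices_cons_colon, ih, pvRuns]; simp
  | case3 x xs hx ih =>
    rw [pvRuns]; simp only [hx, if_false]
    set t0 := xs.takeWhile (fun y => !(y = ":" : Bool)) with ht0
    have ht0free : ∀ y ∈ t0, y ≠ ":" := by
      intro y hy
      have := List.mem_takeWhile_imp (ht0 ▸ hy)
      simpa using this
    rcases hdm : xs.dropWhile (fun y => !(y = ":" : Bool)) with _ | ⟨y, d2⟩
    · -- no colon in x :: xs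
      have htw : t0 = xs := by
        have := List.takeWhile_append_dropWhile
          (p := fun y => !(y = ":" : Bool)) (l := xs)
        rw [hdm, List.append_nil] at this
        rw [ht0, this]
      have hfree : ∀ y ∈ (x :: xs), y ≠ ":" := by
        intro y hy
        rcases List.mem_cons.mp hy with rfl | hy
        · exact hx
        · exact ht0free y (htw ▸ hy)
      have hcuts : pvCuts (x :: xs) = [-1, ((x :: xs).length : Int)] := by
        unfold pvCuts; rw [pvColPos_no_colon _ hfree]; rfl
      rw [hcuts, pvSlices_cons, pvSlices_single, List.append_nil]
      rw [if_pos (by simp only [List.length_cons]; push_cast; omega)]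
      rw [show (-1 : Int) + 1 = ((0 : Nat) : Int) by norm_num,
          PySem.List.slice_natCast]
      rw [pvRuns]
      simp [htw]
    · -- first colon found: xs = t0 ++ ":" :: d2
      have hw : xs.dropWhile (fun y => !(y = ":" : Bool)) ≠ [] := by rw [hdm]; simp
      have hy : y = ":" := by
        have hhead := List.head_dropWhile_not (fun y => !(y = ":" : Bool)) hw
        simp [hdm] at hhead
        exact hhead
      subst hy
      have hxs : xs = t0 ++ ":" :: d2 := by
        have := List.takeWhile_append_dropWhile
          (p := fun y => !(y = ":" : Bool)) (l := xs)
        rw [hdm, ← ht0] at this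
        exact this.symm
      rw [hdm] at ih
      have hd2 : pvSlices d2 (pvCuts d2) = pvRuns d2 := by
        rw [← pvSlices_cons_colon, ih, pvRuns]; simp
      have hk : ((x :: t0) ++ [":"]).length = t0.length + 2 := by simp
      -- colPos over append
      have happ : ∀ (u v : List String) (s : Int),
          pvColPos (u ++ v) s = pvColPos u s ++ pvColPos v (s + u.length) := by
        intro u v s
        unfold pvColPos
        rw [PySem.List.enumerate_append, List.filterMap_append]
      have hcol : pvColPos (x :: xs) 0
          = ((t0.length : Int) + 1) :: (pvColPos d2 0).map (· + ((t0.length : Int) + 2)) := by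
        have hsplit : x :: xs = ((x :: t0) ++ [":"]) ++ d2 := by
          rw [hxs]; simp
        rw [hsplit, happ]
        have hpre : pvColPos ((x :: t0) ++ [":"]) 0 = [((t0.length : Int) + 1)] := by
          rw [happ]
          rw [pvColPos_no_colon (x :: t0)
                (by intro y hy
                    rcases List.mem_cons.mp hy with rfl | hy
                    · exact hx
                    · exact ht0free y hy)]
          rw [pvColPos_cons]
          simp [pvColPos_nil]
        rw [hpre, hk]
        rw [show (0 : Int) + ((t0.length + 2 : Nat) : Int) = 0 + ((t0.length : Int) + 2) by push_cast; ring,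
            pvColPos_shift]
        simp
      have hcuts : pvCuts (x :: xs)
          = -1 :: ((t0.length : Int) + 1) :: ((pvColPos d2 0 ++ [(d2.length : Int)]).map (· + ((t0.length : Int) + 2))) := by
        unfold pvCuts
        rw [hcol]
        have hlen : (((x :: xs).length : Nat) : Int) = (d2.length : Int) + ((t0.length : Int) + 2) := by
          have h' : xs.length = t0.length + (d2.length + 1) := by
            have := congrArg List.length hxs
            simpa using this
          simp only [List.length_cons]
          push_cast
          omega
        rw [hlen]
        simp
      have hmap : ((t0.length : Int) + 1) :: ((pvColPos d2 0 ++ [(d2.length : Int)]).map (· + ((t0.length : Int) + 2)))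
          = (pvCuts d2).map (· + ((t0.length : Int) + 2)) := by
        unfold pvCuts
        simp
        ring
      rw [hcuts, pvSlices_cons]
      rw [if_pos (by omega)]
      have hfirst : PySem.List.slice (x :: xs) (some (-1 + 1)) (some ((t0.length : Int) + 1))
          = x :: t0 := by
        rw [show (-1 : Int) + 1 = ((0 : Nat) : Int) by norm_num,
            show ((t0.length : Int) + 1) = (((t0.length + 1 : Nat)) : Int) by push_cast; ring,
            PySem.List.slice_natCast]
        rw [List.drop_zero, Nat.sub_zero]
        rw [hxs]
        rw [show x :: (t0 ++ ":" :: d2) = (x :: t0) ++ (":" :: d2) by simp]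
        rw [show t0.length + 1 = (x :: t0).length by simp]
        exact List.take_left
      rw [hfirst, hmap]
      have hrest := pvSlices_shift ((x :: t0) ++ [":"]) d2 (pvCuts d2) (pvCuts_ge d2)
      rw [hk] at hrest
      have hseq : ((x :: t0) ++ [":"]) ++ d2 = x :: xs := by rw [hxs]; simp
      rw [hseq] at hrest
      rw [show ((t0.length + 2 : Nat) : Int) = ((t0.length : Int) + 2) by push_cast; ring] at hrest
      rw [hrest, hd2]
      rw [show pvRuns (":" :: d2) = pvRuns d2 from by rw [pvRuns]; simp]
      simp

-- ===== VERDICT (by name: the statement is the Claim_ definition above) =====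
theorem split_token_in_parts_spec : Claim_equal_split_token_in_parts := by
  intro token _
  show _ = _
  unfold split_token_in_parts split_token_in_parts_alt
  rw [foldl_stepA_eq_pvG, (pvG_eq_runs token).1]
  have hB : ((([-1] ++ ((PySem.List.enumerate token).filterMap
               (fun (ip : Int × String) => if ip.2 = ":" then some ip.1 else none)) ++ [(token.length : Int)]).zip
             (([-1] ++ ((PySem.List.enumerate token).filterMap
               (fun (ip : Int × String) => if ip.2 = ":" then some ip.1 else none)) ++ [(token.length : Int)]).tail)).filterMap
      (fun (ab : Int × Int) => if ab.2 - ab.1 > 1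
                 then some (PySem.List.slice token (some (ab.1 + 1)) (some ab.2))
                 else none)) = pvRuns token := by
    have := pvSlices_eq_runs token
    unfold pvSlices pvCuts pvColPos at this
    simpa using this
  have hne := pvRuns_nonempty token
  have hfilter : (pvRuns token).filter (fun p => !p.isEmpty) = pvRuns token := by
    apply List.filter_eq_self.mpr
    intro p hp
    simp [hne p hp]
  simp only [List.nil_append, hfilter]
  simp only [hB]
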